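-- pv_equiv track=rewrite | github.com/ayoubzulfiqar/Leetcode-Medium | ImageOverlap/image_overlap.py | largestOverlap
-- ===== SOURCE A (Python) =====
-- def largestOverlap(img1: list[list[int]], img2: list[list[int]]) -> int:
--     n = len(img1)
--     max_overlap = 0
--
--     # Iterate over all possible vertical shifts (dr)
--     # dr ranges from -(n-1) to (n-1) inclusive.
--     # A positive dr means img1 is effectively shifted downwards relative to img2's fixed position.
--     # A negative dr means img1 is effectively shifted upwards.
--     for dr in range(-(n - 1), n):
--         # Iterate over all possible horizontal shifts (dc)
--         # dc ranges from -(n-1) to (n-1) inclusive.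
--         # A positive dc means img1 is effectively shifted rightwards.
--         # A negative dc means img1 is effectively shifted leftwards.
--         for dc in range(-(n - 1), n):
--             current_overlap = 0
--
--             # Calculate the overlap for the current (dr, dc) translation.
--             # We iterate through each cell (r, c) of the original img1.
--             for r in range(n):
--                 for c in range(n):
--                     # If the current cell in img1 contains a 1,
--                     # we check its corresponding position in img2 after translation.
--                     if img1[r][c] == 1:
--                         # Calculate the coordinates (r_shifted, c_shifted) where img1[r][c]
--                         # would land in the img2's coordinate system after being shifted by (dr, dc).
--                         r_shifted = r + dr
--                         c_shifted = c + dc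
--
--                         # Check if this shifted position is within the valid bounds of img2.
--                         # Bits translated outside the matrix borders are "erased" and don't contribute to overlap.
--                         if 0 <= r_shifted < n and 0 <= c_shifted < n:
--                             # If img2 also has a 1 at this corresponding position, it's an overlap.
--                             if img2[r_shifted][c_shifted] == 1:
--                                 current_overlap += 1
--
--             # Update the maximum overlap found across all tested translations.
--             max_overlap = max(max_overlap, current_overlap)
--
--     return max_overlap
-- ===== SOURCE B (Python) =====
-- def largestOverlap(img1: list[list[int]], img2: list[list[int]]) -> int:
--     # Collect coordinates of 1-bits, then count each translation offset once per
--     # matching pair of bits; the answer is the most frequent offset's count.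
--     ones1 = [(r, c) for r, row in enumerate(img1) for c, v in enumerate(row) if v == 1]
--     ones2 = [(r, c) for r, row in enumerate(img2) for c, v in enumerate(row) if v == 1]
--     cnt = {}
--     for r1, c1 in ones1:
--         for r2, c2 in ones2:
--             d = (r2 - r1, c2 - c1)
--             cnt[d] = cnt.get(d, 0) + 1
--     return max(cnt.values(), default=0)
-- ===== Notes on version B (the rewrite author's own statement) =====
-- stated objective: faster
-- what changed: Instead of recomputing the overlap with a full n^2 scan for every one of the (2n-1)^2 translations, B extracts the coordinates of the 1-bits once and counts, in a dictionary, how many bit pairs realize each translation offset, returning the largest count.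
-- outside the precondition, e.g. on largestOverlap([[1, 1]], [[0, 1]]): A returns 0, B returns 1; on largestOverlap([[1]], [[0, 1]]): A returns 0, B returns 1
import Mathlib
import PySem

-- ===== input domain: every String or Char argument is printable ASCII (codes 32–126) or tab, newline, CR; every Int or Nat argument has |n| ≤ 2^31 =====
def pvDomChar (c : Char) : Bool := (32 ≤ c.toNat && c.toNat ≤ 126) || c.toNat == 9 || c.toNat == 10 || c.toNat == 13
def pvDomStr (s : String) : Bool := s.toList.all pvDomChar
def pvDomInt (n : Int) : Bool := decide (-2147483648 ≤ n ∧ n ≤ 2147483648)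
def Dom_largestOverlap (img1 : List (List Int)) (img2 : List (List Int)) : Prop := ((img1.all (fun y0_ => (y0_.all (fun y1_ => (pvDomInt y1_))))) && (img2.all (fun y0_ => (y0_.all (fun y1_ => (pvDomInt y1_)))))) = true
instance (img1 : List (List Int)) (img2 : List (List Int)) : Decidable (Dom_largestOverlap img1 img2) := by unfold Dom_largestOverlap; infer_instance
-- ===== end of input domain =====

-- B replaces the O(n^4) scan over all translations by counting, per pair of set bits, the offset that maps one to the other (proved equal on the clean-window inputs of the stated Pre_).


-- ===== PORT A =====
def largestOverlap (img1 : List (List Int)) (img2 : List (List Int)) : Int :=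
  let n : Int := PySem.List.len img1
  (PySem.List.pyRange (-(n - 1)) n 1).foldl (fun maxOverlap dr =>
    (PySem.List.pyRange (-(n - 1)) n 1).foldl (fun maxOverlap dc =>
      let cur :=
        (PySem.List.pyRange 0 n 1).foldl (fun cur r =>
          (PySem.List.pyRange 0 n 1).foldl (fun cur c =>
            if PySem.List.pyGetD (PySem.List.pyGetD img1 r []) c 0 == 1 then
              let rShifted := r + dr
              let cShifted := c + dc
              if 0 ≤ rShifted ∧ rShifted < n ∧ 0 ≤ cShifted ∧ cShifted < n then
                if PySem.List.pyGetD (PySem.List.pyGetD img2 rShifted []) cShifted 0 == 1 then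
                  cur + 1
                else cur
              else cur
            else cur) cur) 0
      max maxOverlap cur) maxOverlap) 0

-- ===== PORT B =====
-- the comprehension [(r, c) for r, row in enumerate(img) for c, v in enumerate(row) if v == 1]
def pvOnesRow (r : Int) (row : List Int) : List (Int × Int) :=
  (PySem.List.enumerate row).filterMap (fun cv => if cv.2 == 1 then some (r, cv.1) else none)

def pvOnes (img : List (List Int)) : List (Int × Int) :=
  (PySem.List.enumerate img).flatMap (fun p => pvOnesRow p.1 p.2)

def largestOverlap_alt (img1 : List (List Int)) (img2 : List (List Int)) : Int :=
  let ones1 := pvOnes img1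
  let ones2 := pvOnes img2
  let cnt : PySem.Dict (Int × Int) Int :=
    ones1.foldl (fun d p1 =>
      ones2.foldl (fun d p2 => d.modify (p2.1 - p1.1, p2.2 - p1.2) 0 (· + 1)) d)
      PySem.Dict.empty
  PySem.List.maxD cnt.values (fun v => v) 0

-- ===== PRECONDITION & SPEC =====
-- Pre_ asks that img1's rows have length at least n = len(img1), and that either img1 has no
-- 1-bit at all, or every 1-bit of both images lies inside the leading n x n window (with img2
-- at least n x n): the problem's images are square n x n, and outside this shape A either
-- raises IndexError or silently ignores the entries beyond the window.
def Pre_largestOverlap (img1 : List (List Int)) (img2 : List (List Int)) : Prop :=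
  (∀ row ∈ img1, img1.length ≤ row.length ∧ (1 : Int) ∉ row.drop img1.length) ∧
    ((∀ row ∈ img1, (1 : Int) ∉ row) ∨
      (img1.length ≤ img2.length ∧
        (∀ row ∈ img2.take img1.length, img1.length ≤ row.length ∧ (1 : Int) ∉ row.drop img1.length) ∧
        (∀ row ∈ img2.drop img1.length, (1 : Int) ∉ row)))
instance (img1 : List (List Int)) (img2 : List (List Int)) : Decidable (Pre_largestOverlap img1 img2) := by
  unfold Pre_largestOverlap; infer_instance
def pvWitness_largestOverlap : List (List Int) × List (List Int) :=
  ([[1, 0], [0, 1]], [[0, 1], [1, 0]])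

def Spec_largestOverlap (img1 : List (List Int)) (img2 : List (List Int)) (out : Int) : Prop := out = largestOverlap_alt img1 img2
instance (img1 : List (List Int)) (img2 : List (List Int)) (out : Int) : Decidable (Spec_largestOverlap img1 img2 out) := by unfold Spec_largestOverlap; infer_instance

-- ===== CLAIM (what is proved, stated in full; the proofs are below) =====
def Claim_equal_largestOverlap : Prop := ∀ (img1 : List (List Int)) (img2 : List (List Int)), Dom_largestOverlap img1 img2 → Pre_largestOverlap img1 img2 → Spec_largestOverlap img1 img2 (largestOverlap img1 img2)

-- ===== LEMMAS AND PROOFS =====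
def pvGet (img : List (List Int)) (r c : Int) : Int :=
  PySem.List.pyGetD (PySem.List.pyGetD img r []) c 0

-- the "clean window" shape Pre_ demands of each image: at least n rows of length
-- at least n, with no 1-entry outside the leading n × n window
def pvWin (img : List (List Int)) (n : Nat) : Prop :=
  n ≤ img.length ∧ (∀ row ∈ img.take n, n ≤ row.length ∧ (1 : Int) ∉ row.drop n) ∧
    (∀ row ∈ img.drop n, (1 : Int) ∉ row)

lemma mem_drop_of_getElem {α : Type} (l : List α) (n j : Nat) (hn : n ≤ j) (hj : j < l.length) :
    l[j] ∈ l.drop n := by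
  have hlt : j - n < (l.drop n).length := by simp only [List.length_drop]; omega
  have hmem : (l.drop n)[j - n] ∈ l.drop n := List.getElem_mem hlt
  simpa [List.getElem_drop, show n + (j - n) = j by omega] using hmem

lemma mem_take_of_getElem {α : Type} (l : List α) (n j : Nat) (hn : j < n) (hj : j < l.length) :
    l[j] ∈ l.take n := by
  have hlt : j < (l.take n).length := by simp only [List.length_take]; omega
  have hmem : (l.take n)[j] ∈ l.take n := List.getElem_mem hlt
  simpa [List.getElem_take] using hmem

lemma row_in_take (img : List (List Int)) (n : Nat) (hn : n ≤ img.length) (a : Int)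
    (h0 : 0 ≤ a) (h1 : a < (n : Int)) : PySem.List.pyGetD img a [] ∈ img.take n := by
  have hlen : a < (img.length : Int) := by omega
  rw [PySem.List.pyGetD_eq_getElem img [] h0 hlen]
  exact mem_take_of_getElem img n a.toNat (by omega) (by omega)

lemma mem_pvOnesW (img : List (List Int)) (n : Nat) (hw : pvWin img n) (a b : Int) :
    (a, b) ∈ pvOnes img ↔ 0 ≤ a ∧ a < (n : Int) ∧ 0 ≤ b ∧ b < (n : Int) ∧ pvGet img a b = 1 := by
  obtain ⟨hn, hrows, hx⟩ := hw
  simp only [pvOnes, pvOnesRow, List.mem_flatMap, List.mem_filterMap,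
    PySem.List.enumerate_eq_map_pyRange img [], List.mem_map]
  constructor
  · rintro ⟨p, ⟨j, hj, rfl⟩, ⟨cv, hcv, hif⟩⟩
    rw [PySem.List.enumerate_eq_map_pyRange _ 0, List.mem_map] at hcv
    obtain ⟨c, hc, rfl⟩ := hcv
    by_cases h1 : PySem.List.pyGetD (PySem.List.pyGetD img j []) c 0 == 1
    · simp only [h1, if_true, Option.some.injEq, Prod.mk.injEq] at hif
      rw [PySem.List.mem_pyRange_one] at hj hc
      simp only [PySem.List.len_eq] at hj hc
      obtain ⟨rfl, rfl⟩ := hif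
      have hrowe : PySem.List.pyGetD img j [] = img[j.toNat] :=
        PySem.List.pyGetD_eq_getElem img [] hj.1 hj.2
      have hval : pvGet img j c = 1 := by simpa [pvGet] using (eq_of_beq h1)
      have hvmem : pvGet img j c ∈ PySem.List.pyGetD img j [] := by
        rw [pvGet, PySem.List.pyGetD_eq_getElem _ 0 hc.1 hc.2]
        exact List.getElem_mem _
      have hjn : j < (n : Int) := by
        by_contra hge
        have hmem : img[j.toNat] ∈ img.drop n := mem_drop_of_getElem img n j.toNat (by omega) (by omega)
        exact hx _ (hrowe ▸ hmem) (hval ▸ hvmem)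
      obtain ⟨hrlen, hrclean⟩ := hrows _ (row_in_take img n hn j hj.1 hjn)
      have hcn : c < (n : Int) := by
        by_contra hge
        set row := PySem.List.pyGetD img j [] with hrowdef
        have hrl : c.toNat < row.length := by
          have := hc.2; omega
        have hmem : pvGet img j c ∈ row.drop n := by
          rw [pvGet, PySem.List.pyGetD_eq_getElem _ 0 hc.1 hc.2]
          exact mem_drop_of_getElem row n c.toNat (by omega) hrl
        exact absurd (hval ▸ hmem) hrclean
      exact ⟨hj.1, hjn, hc.1, hcn, hval⟩
    · simp [h1] at hif
  · rintro ⟨ha0, han, hb0, hbn, hget⟩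
    have hrlen : n ≤ (PySem.List.pyGetD img a []).length :=
      (hrows _ (row_in_take img n hn a ha0 han)).1
    refine ⟨(a, PySem.List.pyGetD img a []), ⟨a, ?_, rfl⟩, ?_⟩
    · rw [PySem.List.mem_pyRange_one]
      simp only [PySem.List.len_eq]
      omega
    · refine ⟨(b, PySem.List.pyGetD (PySem.List.pyGetD img a []) b 0), ?_, ?_⟩
      · rw [PySem.List.enumerate_eq_map_pyRange _ 0, List.mem_map]
        refine ⟨b, ?_, rfl⟩
        rw [PySem.List.mem_pyRange_one]
        simp only [PySem.List.len_eq]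
        omega
      · have : PySem.List.pyGetD (PySem.List.pyGetD img a []) b 0 == 1 := by
          simpa [pvGet] using hget
        simp [this]

lemma nodup_pvOnes (img : List (List Int)) : (pvOnes img).Nodup := by
  rw [pvOnes, List.nodup_flatMap]
  constructor
  · intro p _
    apply List.Nodup.filterMap
    · intro a b c ha hb
      by_cases h1 : a.2 == 1 <;> simp [h1] at ha
      by_cases h2 : b.2 == 1 <;> simp [h2] at hb
      have := eq_of_beq h1; have := eq_of_beq h2
      obtain ⟨x, y⟩ := a; obtain ⟨u, v⟩ := b
      simp_all [Prod.ext_iff]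
    · rw [PySem.List.enumerate_eq_map_pyRange _ 0]
      exact (PySem.List.nodup_pyRange_one _ _).map (fun x y h => by simpa using congrArg Prod.fst h)
  · rw [PySem.List.enumerate_eq_map_pyRange img []]
    refine ((PySem.List.pairwise_lt_pyRange_one _ _).map _ ?_)
    intro x y hxy q hq hq'
    simp only [pvOnesRow, List.mem_filterMap] at hq hq'
    obtain ⟨cv, _, h1⟩ := hq; obtain ⟨cv', _, h2⟩ := hq'
    by_cases b1 : cv.2 == 1 <;> simp [b1] at h1
    by_cases b2 : cv'.2 == 1 <;> simp [b2] at h2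
    have : q.1 = x := by rw [← h1]
    have : q.1 = y := by rw [← h2]
    omega

lemma count_pvOnesW (img : List (List Int)) (n : Nat) (hw : pvWin img n) (a b : Int) :
    ((pvOnes img).count (a, b) : Int) =
      if 0 ≤ a ∧ a < (n : Int) ∧ 0 ≤ b ∧ b < (n : Int) ∧ pvGet img a b = 1 then 1 else 0 := by
  rw [(nodup_pvOnes img).count]
  have hm := mem_pvOnesW img n hw a b
  by_cases h : (a, b) ∈ pvOnes img
  · simp [h, hm.mp h]
  · have h2 : ¬(0 ≤ a ∧ a < (n : Int) ∧ 0 ≤ b ∧ b < (n : Int) ∧ pvGet img a b = 1) :=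
      fun hc => h (hm.mpr hc)
    simp [h, h2]

lemma foldl_step_sum {α β : Type} (l : List α) (f : α → Option β) (g : β → Int)
    (step : Int → α → Int) (h : ∀ cur x, x ∈ l → step cur x = cur + ((f x).elim 0 g)) :
    ∀ cur, l.foldl step cur = cur + ((l.filterMap f).map g).sum := by
  induction l with
  | nil => simp
  | cons x t ih =>
    intro cur
    rw [List.foldl_cons, ih (fun c y hy => h c y (by simp [hy])), h cur x (by simp),
      List.filterMap_cons]
    cases hf : f x
    · simp
    · simp; ring

lemma row_fold (img2 : List (List Int)) (n : Nat)
    (hcnt2 : ∀ a b : Int, ((pvOnes img2).count (a, b) : Int) =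
      if 0 ≤ a ∧ a < (n : Int) ∧ 0 ≤ b ∧ b < (n : Int) ∧ pvGet img2 a b = 1 then 1 else 0)
    (row : List Int) (hrow : row.length = n) (r dr dc : Int) (cur : Int) :
    (PySem.List.pyRange 0 ((n : Nat) : Int) 1).foldl (fun cur c =>
      if PySem.List.pyGetD row c 0 == 1 then
        if 0 ≤ r + dr ∧ r + dr < ((n : Nat) : Int) ∧ 0 ≤ c + dc ∧ c + dc < ((n : Nat) : Int) then
          if PySem.List.pyGetD (PySem.List.pyGetD img2 (r + dr) []) (c + dc) 0 == 1 then
            cur + 1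
          else cur
        else cur
      else cur) cur
    = cur + ((pvOnesRow r row).map
        (fun p1 => (((pvOnes img2).count (p1.1 + dr, p1.2 + dc) : Nat) : Int))).sum := by
  have hlen : ((n : Nat) : Int) = PySem.List.len row := by
    simp [PySem.List.len_eq, hrow]
  rw [hlen, show (PySem.List.pyRange 0 (PySem.List.len row) 1).foldl _ cur =
      (PySem.List.enumerate row).foldl (fun cur cv =>
        if cv.2 == 1 then
          if 0 ≤ r + dr ∧ r + dr < PySem.List.len row ∧ 0 ≤ cv.1 + dc ∧ cv.1 + dc < PySem.List.len row then
            if PySem.List.pyGetD (PySem.List.pyGetD img2 (r + dr) []) (cv.1 + dc) 0 == 1 then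
              cur + 1
            else cur
          else cur
        else cur) cur from by
    rw [PySem.List.enumerate_eq_map_pyRange row 0, List.foldl_map]]
  rw [pvOnesRow]
  apply foldl_step_sum
  intro c cv _
  by_cases hv : cv.2 == 1
  · simp only [hv, if_true, Option.elim]
    rw [hcnt2]
    rw [← hlen]
    clear hcnt2
    split_ifs with hb hg hcond <;> simp_all [pvGet, beq_iff_eq]
  · simp [hv]

lemma onesRow_take (row : List Int) (n : Nat) (hclean : (1 : Int) ∉ row.drop n) (r : Int) :
    pvOnesRow r row = pvOnesRow r (row.take n) := by
  have hsplit : PySem.List.enumerate row =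
      PySem.List.enumerate (row.take n) ++
        PySem.List.enumerate (row.drop n) (0 + (row.take n).length) := by
    conv_lhs => rw [← List.take_append_drop n row]
    rw [PySem.List.enumerate_append]
  rw [pvOnesRow, hsplit, List.filterMap_append, pvOnesRow]
  have hnil : (PySem.List.enumerate (row.drop n) (0 + (row.take n).length)).filterMap
      (fun cv => if cv.2 == 1 then some (r, cv.1) else none) = [] := by
    rw [List.filterMap_eq_nil_iff]
    intro cv hcv
    have : cv.2 ∈ row.drop n := by
      have := PySem.List.map_snd_enumerate (row.drop n) (0 + (row.take n).length)
      rw [← this]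
      exact List.mem_map.mpr ⟨cv, hcv, rfl⟩
    have hne : ¬(cv.2 = 1) := fun h => hclean (h ▸ this)
    simp [hne]
  rw [hnil, List.append_nil]

lemma row_foldW (img2 : List (List Int)) (n : Nat)
    (hcnt2 : ∀ a b : Int, ((pvOnes img2).count (a, b) : Int) =
      if 0 ≤ a ∧ a < (n : Int) ∧ 0 ≤ b ∧ b < (n : Int) ∧ pvGet img2 a b = 1 then 1 else 0)
    (row : List Int) (hrlen : n ≤ row.length) (hclean : (1 : Int) ∉ row.drop n)
    (r dr dc : Int) (cur : Int) :
    (PySem.List.pyRange 0 ((n : Nat) : Int) 1).foldl (fun cur c =>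
      if PySem.List.pyGetD row c 0 == 1 then
        if 0 ≤ r + dr ∧ r + dr < ((n : Nat) : Int) ∧ 0 ≤ c + dc ∧ c + dc < ((n : Nat) : Int) then
          if PySem.List.pyGetD (PySem.List.pyGetD img2 (r + dr) []) (c + dc) 0 == 1 then
            cur + 1
          else cur
        else cur
      else cur) cur
    = cur + ((pvOnesRow r row).map
        (fun p1 => (((pvOnes img2).count (p1.1 + dr, p1.2 + dc) : Nat) : Int))).sum := by
  have htlen : (row.take n).length = n := by
    simp only [List.length_take]; omega
  rw [PySem.List.foldl_congr_mem' _ _ (fun cur c =>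
      if PySem.List.pyGetD (row.take n) c 0 == 1 then
        if 0 ≤ r + dr ∧ r + dr < ((n : Nat) : Int) ∧ 0 ≤ c + dc ∧ c + dc < ((n : Nat) : Int) then
          if PySem.List.pyGetD (PySem.List.pyGetD img2 (r + dr) []) (c + dc) 0 == 1 then
            cur + 1
          else cur
        else cur
      else cur) cur ?_]
  · rw [row_fold img2 n hcnt2 (row.take n) htlen r dr dc cur, onesRow_take row n hclean r]
  · intro c hc cur
    rw [PySem.List.mem_pyRange_one] at hc
    have hval : PySem.List.pyGetD row c 0 = PySem.List.pyGetD (row.take n) c 0 := by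
      rw [PySem.List.pyGetD_eq_getElem row 0 hc.1 (by omega),
        PySem.List.pyGetD_eq_getElem (row.take n) 0 hc.1 (by rw [htlen]; omega),
        List.getElem_take]
    rw [hval]

lemma count_map_sub (l : List (Int × Int)) (r1 c1 dr dc : Int) :
    (l.map (fun p2 => (p2.1 - r1, p2.2 - c1))).count (dr, dc) = l.count (r1 + dr, c1 + dc) := by
  simp only [List.count, List.countP_map]
  apply List.countP_congr
  intro p2 _
  obtain ⟨x, y⟩ := p2
  simp only [Function.comp, beq_iff_eq, Prod.ext_iff]
  constructor <;> (intro h; omega)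

lemma inner_eq (img1 img2 : List (List Int)) (n : Nat)
    (h1 : img1.length = n)
    (hr1 : ∀ row ∈ img1, n ≤ row.length ∧ (1 : Int) ∉ row.drop n)
    (hcnt2 : ∀ a b : Int, ((pvOnes img2).count (a, b) : Int) =
      if 0 ≤ a ∧ a < (n : Int) ∧ 0 ≤ b ∧ b < (n : Int) ∧ pvGet img2 a b = 1 then 1 else 0)
    (dr dc : Int) :
    (PySem.List.pyRange 0 (PySem.List.len img1) 1).foldl (fun cur r =>
      (PySem.List.pyRange 0 (PySem.List.len img1) 1).foldl (fun cur c =>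
        if PySem.List.pyGetD (PySem.List.pyGetD img1 r []) c 0 == 1 then
          if 0 ≤ r + dr ∧ r + dr < PySem.List.len img1 ∧ 0 ≤ c + dc ∧ c + dc < PySem.List.len img1 then
            if PySem.List.pyGetD (PySem.List.pyGetD img2 (r + dr) []) (c + dc) 0 == 1 then
              cur + 1
            else cur
          else cur
        else cur) cur) 0
    = (((pvOnes img1).flatMap
        (fun p1 => (pvOnes img2).map (fun p2 => (p2.1 - p1.1, p2.2 - p1.2)))).count (dr, dc) : Int) := by
  have hN : PySem.List.len img1 = ((n : Nat) : Int) := by simp [PySem.List.len_eq, h1]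
  rw [List.count_flatMap]
  rw [Nat.cast_list_sum, List.map_map]
  have hRHS : (List.map (Nat.cast ∘ (List.count (dr, dc) ∘ fun p1 =>
      (pvOnes img2).map fun p2 => (p2.1 - p1.1, p2.2 - p1.2))) (pvOnes img1) : List Int)
      = (pvOnes img1).map (fun p1 => (((pvOnes img2).count (p1.1 + dr, p1.2 + dc) : Nat) : Int)) := by
    apply List.map_congr_left
    intro p1 _
    simp only [Function.comp]
    rw [count_map_sub]
  rw [hRHS]
  rw [show (PySem.List.pyRange 0 (PySem.List.len img1) 1).foldl _ (0 : Int) =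
      (PySem.List.enumerate img1).foldl (fun cur p =>
        (PySem.List.pyRange 0 (PySem.List.len img1) 1).foldl (fun cur c =>
          if PySem.List.pyGetD p.2 c 0 == 1 then
            if 0 ≤ p.1 + dr ∧ p.1 + dr < PySem.List.len img1 ∧ 0 ≤ c + dc ∧ c + dc < PySem.List.len img1 then
              if PySem.List.pyGetD (PySem.List.pyGetD img2 (p.1 + dr) []) (c + dc) 0 == 1 then
                cur + 1
              else cur
            else cur
          else cur) cur) (0 : Int) from by
    rw [PySem.List.enumerate_eq_map_pyRange img1 [], List.foldl_map]]
  rw [PySem.List.foldl_congr_mem' (PySem.List.enumerate img1) _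
      (fun cur p => cur + ((pvOnesRow p.1 p.2).map
        (fun p1 => (((pvOnes img2).count (p1.1 + dr, p1.2 + dc) : Nat) : Int))).sum) 0 ?_]
  · rw [PySem.List.foldl_add]
    conv_rhs => rw [show pvOnes img1 = (PySem.List.enumerate img1).flatMap (fun p => pvOnesRow p.1 p.2) from rfl,
      List.map_flatMap, List.flatMap_def, List.sum_flatten, List.map_map]
    simp [Function.comp_def]
  · intro p hp cur
    have hrow : p.2 ∈ img1 := by
      rw [PySem.List.enumerate_eq_map_pyRange img1 [], List.mem_map] at hp
      obtain ⟨j, hj, rfl⟩ := hp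
      rw [PySem.List.mem_pyRange_one] at hj
      simp only [PySem.List.len_eq] at hj
      rw [PySem.List.pyGetD_eq_getElem img1 [] hj.1 (by simpa using hj.2)]
      exact List.getElem_mem _
    obtain ⟨hrlen, hclean⟩ := hr1 _ hrow
    rw [hN]
    exact row_foldW img2 n hcnt2 p.2 hrlen hclean p.1 dr dc cur



lemma nested_max (R S : List Int) (f : Int → Int → Int) (a : Int) :
    R.foldl (fun a dr => S.foldl (fun a dc => max a (f dr dc)) a) a
    = (R.flatMap (fun dr => S.map (fun dc => (dr, dc)))).foldl (fun a p => max a (f p.1 p.2)) a := by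
  rw [List.foldl_flatMap]
  simp only [List.foldl_map]

lemma hA (img1 img2 : List (List Int)) (n : Nat)
    (h1 : img1.length = n)
    (hr1 : ∀ row ∈ img1, n ≤ row.length ∧ (1 : Int) ∉ row.drop n)
    (hw2 : pvWin img2 n) :
    largestOverlap img1 img2 =
      ((PySem.List.pyRange (-(PySem.List.len img1 - 1)) (PySem.List.len img1) 1).flatMap
        (fun dr => (PySem.List.pyRange (-(PySem.List.len img1 - 1)) (PySem.List.len img1) 1).map
          (fun dc => (dr, dc)))).foldl
        (fun a p => max a ((((pvOnes img1).flatMap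
          (fun p1 => (pvOnes img2).map (fun p2 => (p2.1 - p1.1, p2.2 - p1.2)))).count (p.1, p.2) : Int))) 0 := by
  simp only [largestOverlap]
  refine Eq.trans ?_ (nested_max _ _ (fun dr dc => (((pvOnes img1).flatMap
    (fun p1 => (pvOnes img2).map (fun p2 => (p2.1 - p1.1, p2.2 - p1.2)))).count (dr, dc) : Int)) 0)
  apply PySem.List.foldl_congr_mem'
  intro dr _ a
  apply PySem.List.foldl_congr_mem'
  intro dc _ b
  rw [inner_eq img1 img2 n h1 hr1 (count_pvOnesW img2 n hw2) dr dc]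

lemma hB (img1 img2 : List (List Int)) :
    largestOverlap_alt img1 img2 =
      PySem.List.maxD ((PySem.Set.ofList ((pvOnes img1).flatMap
          (fun p1 => (pvOnes img2).map (fun p2 => (p2.1 - p1.1, p2.2 - p1.2))))).map
        (fun k => ((((pvOnes img1).flatMap
          (fun p1 => (pvOnes img2).map (fun p2 => (p2.1 - p1.1, p2.2 - p1.2)))).count k : Nat) : Int)))
        (fun v => v) 0 := by
  simp only [largestOverlap_alt]
  have hcnt : (pvOnes img1).foldl (fun d p1 =>
      (pvOnes img2).foldl (fun d p2 => d.modify (p2.1 - p1.1, p2.2 - p1.2) 0 (· + 1)) d)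
      PySem.Dict.empty
      = PySem.Dict.counter ((pvOnes img1).flatMap
          (fun p1 => (pvOnes img2).map (fun p2 => (p2.1 - p1.1, p2.2 - p1.2)))) := by
    rw [PySem.Dict.counter_eq_foldl, List.foldl_flatMap]
    simp only [List.foldl_map]
  rw [hcnt, PySem.Dict.values_eq_map_keys _ (PySem.Dict.nodup_keys_counter _) 0,
    PySem.Dict.keys_counter]
  congr 1
  apply List.map_congr_left
  intro k _
  rw [PySem.Dict.getD_counter]

lemma foldl_max_le_proj {α : Type} (l : List α) (f : α → Int) (B : Int) :
    ∀ init, init ≤ B → (∀ x ∈ l, f x ≤ B) → l.foldl (fun a x => max a (f x)) init ≤ B := by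
  induction l with
  | nil => intro init h _; simpa
  | cons x t ih =>
    intro init h hx
    rw [List.foldl_cons]
    exact ih _ (max_le h (hx x (by simp))) (fun y hy => hx y (by simp [hy]))

lemma foldl_max_le_plain (l : List Int) (B : Int) :
    ∀ init, init ≤ B → (∀ x ∈ l, x ≤ B) → l.foldl max init ≤ B := by
  induction l with
  | nil => intro init h _; simpa
  | cons x t ih =>
    intro init h hx
    rw [List.foldl_cons]
    exact ih _ (max_le h (hx x (by simp))) (fun y hy => hx y (by simp [hy]))

lemma mem_D_mem_RR (img1 img2 : List (List Int)) (n : Nat)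
    (h1 : img1.length = n) (hw1 : pvWin img1 n) (hw2 : pvWin img2 n) (p : Int × Int)
    (hp : p ∈ (pvOnes img1).flatMap
        (fun p1 => (pvOnes img2).map (fun p2 => (p2.1 - p1.1, p2.2 - p1.2)))) :
    p ∈ (PySem.List.pyRange (-(PySem.List.len img1 - 1)) (PySem.List.len img1) 1).flatMap
        (fun dr => (PySem.List.pyRange (-(PySem.List.len img1 - 1)) (PySem.List.len img1) 1).map
          (fun dc => (dr, dc))) := by
  rw [List.mem_flatMap] at hp
  obtain ⟨p1, hp1, hp2⟩ := hp
  rw [List.mem_map] at hp2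
  obtain ⟨p2, hp2, rfl⟩ := hp2
  obtain ⟨a1, b1⟩ := p1
  obtain ⟨a2, b2⟩ := p2
  rw [mem_pvOnesW img1 n hw1] at hp1
  rw [mem_pvOnesW img2 n hw2] at hp2
  rw [List.mem_flatMap]
  have hN : PySem.List.len img1 = ((n : Nat) : Int) := by simp [PySem.List.len_eq, h1]
  refine ⟨a2 - a1, ?_, ?_⟩
  · rw [PySem.List.mem_pyRange_one, hN]
    constructor <;> [skip; skip] <;> omega
  · rw [List.mem_map]
    exact ⟨b2 - b1, by rw [PySem.List.mem_pyRange_one, hN]; omega, rfl⟩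

lemma main_eq (img1 img2 : List (List Int)) (n : Nat)
    (h1 : img1.length = n)
    (hr1 : ∀ row ∈ img1, n ≤ row.length ∧ (1 : Int) ∉ row.drop n)
    (hw2 : pvWin img2 n) :
    largestOverlap img1 img2 = largestOverlap_alt img1 img2 := by
  have hw1 : pvWin img1 n := by
    refine ⟨by omega, ?_, ?_⟩
    · intro row hrow
      exact hr1 row (by rwa [List.take_of_length_le (by omega)] at hrow)
    · intro row hrow
      rw [List.drop_eq_nil_of_le (by omega)] at hrow
      simp at hrow
  rw [hA img1 img2 n h1 hr1 hw2, hB img1 img2]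
  set D := (pvOnes img1).flatMap
    (fun p1 => (pvOnes img2).map (fun p2 => (p2.1 - p1.1, p2.2 - p1.2))) with hD
  set RR := (PySem.List.pyRange (-(PySem.List.len img1 - 1)) (PySem.List.len img1) 1).flatMap
    (fun dr => (PySem.List.pyRange (-(PySem.List.len img1 - 1)) (PySem.List.len img1) 1).map
      (fun dc => (dr, dc))) with hRR
  have hDRR : ∀ p ∈ D, p ∈ RR := fun p hp =>
    mem_D_mem_RR img1 img2 n h1 hw1 hw2 p hp
  cases hK : PySem.Set.ofList D with
  | nil =>
    have hDnil : D = [] := by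
      cases hDc : D with
      | nil => rfl
      | cons x t =>
        exfalso
        have : x ∈ PySem.Set.ofList D := (PySem.Set.mem_ofList D x).mpr (by rw [hDc]; simp)
        rw [hK] at this
        simp at this
    simp only [hDnil, List.count_nil, List.map_nil, PySem.List.maxD]
    rw [show PySem.List.max? ([] : List Int) (fun v => v) = none from
      (PySem.List.max?_eq_none_iff _ _).mpr rfl]
    simp only [Option.getD_none, Nat.cast_zero]
    apply le_antisymm
    · exact foldl_max_le_proj RR _ 0 0 le_rfl (fun x _ => le_rfl)
    · exact (PySem.List.le_foldl_max_int RR _ 0).1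
  | cons k0 t =>
    have hk0D : k0 ∈ D := (PySem.Set.mem_ofList D k0).mp (by rw [hK]; simp)
    have htD : ∀ k ∈ t, k ∈ D := fun k hk =>
      (PySem.Set.mem_ofList D k).mp (by rw [hK]; simp [hk])
    rw [List.map_cons, PySem.List.maxD, PySem.List.max?_id_cons, Option.getD_some]
    set cnt : Int × Int → Int := fun k => ((D.count k : Nat) : Int) with hcnt
    have hmemD_le : ∀ k ∈ D, cnt k ≤ (List.map cnt t).foldl max (cnt k0) := by
      intro k hk
      have : k ∈ PySem.Set.ofList D := (PySem.Set.mem_ofList D k).mpr hk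
      rw [hK] at this
      rcases List.mem_cons.mp this with h | h
      · subst h
        exact (PySem.List.le_foldl_max (List.map cnt t) (cnt k)).1
      · exact (PySem.List.le_foldl_max (List.map cnt t) (cnt k0)).2 _
          (List.mem_map.mpr ⟨k, h, rfl⟩)
    apply le_antisymm
    · apply foldl_max_le_proj
      · calc (0 : Int) ≤ cnt k0 := by simp [hcnt]
          _ ≤ _ := (PySem.List.le_foldl_max (List.map cnt t) (cnt k0)).1
      · intro p _
        by_cases hp : (p.1, p.2) ∈ D
        · simpa using hmemD_le _ hp
        · have : D.count (p.1, p.2) = 0 := List.count_eq_zero.mpr hp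
          rw [this]
          calc ((0 : Nat) : Int) = 0 := by simp
            _ ≤ cnt k0 := by simp [hcnt]
            _ ≤ _ := (PySem.List.le_foldl_max (List.map cnt t) (cnt k0)).1
    · apply foldl_max_le_plain
      · have := (PySem.List.le_foldl_max_int RR (fun p => ((D.count (p.1, p.2) : Nat) : Int)) 0).2
          k0 (hDRR k0 hk0D)
        simpa [hcnt] using this
      · intro x hx
        obtain ⟨k, hk, rfl⟩ := List.mem_map.mp hx
        have := (PySem.List.le_foldl_max_int RR (fun p => ((D.count (p.1, p.2) : Nat) : Int)) 0).2
          k (hDRR k (htD k hk))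
        simpa [hcnt] using this

lemma pvOnes_nil (img1 : List (List Int)) (hclean : ∀ row ∈ img1, (1 : Int) ∉ row) :
    pvOnes img1 = [] := by
  rw [List.eq_nil_iff_forall_not_mem]
  intro p hp
  simp only [pvOnes, pvOnesRow, List.mem_flatMap, List.mem_filterMap] at hp
  obtain ⟨q, hq, cv, hcv, hif⟩ := hp
  by_cases h : cv.2 == 1
  · have hv : cv.2 ∈ q.2 := by
      have := PySem.List.map_snd_enumerate q.2 0
      rw [← this]
      exact List.mem_map.mpr ⟨cv, hcv, rfl⟩
    have hrow : q.2 ∈ img1 := by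
      have := PySem.List.map_snd_enumerate img1 0
      rw [← this]
      exact List.mem_map.mpr ⟨q, hq, rfl⟩
    exact hclean _ hrow (eq_of_beq h ▸ hv)
  · simp [h] at hif

lemma altZero (img1 img2 : List (List Int)) (h : pvOnes img1 = []) :
    largestOverlap_alt img1 img2 = 0 := by
  simp only [largestOverlap_alt, h, List.foldl_nil]
  rfl

lemma aZero (img1 img2 : List (List Int)) (n : Nat) (h1 : img1.length = n)
    (hr : ∀ row ∈ img1, n ≤ row.length ∧ (1 : Int) ∉ row) :
    largestOverlap img1 img2 = 0 := by
  simp only [largestOverlap]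
  have hN : PySem.List.len img1 = ((n : Nat) : Int) := by simp [PySem.List.len_eq, h1]
  have hinner : ∀ dr dc : Int,
      (PySem.List.pyRange 0 (PySem.List.len img1) 1).foldl (fun cur r =>
        (PySem.List.pyRange 0 (PySem.List.len img1) 1).foldl (fun cur c =>
          if PySem.List.pyGetD (PySem.List.pyGetD img1 r []) c 0 == 1 then
            if 0 ≤ r + dr ∧ r + dr < PySem.List.len img1 ∧ 0 ≤ c + dc ∧ c + dc < PySem.List.len img1 then
              if PySem.List.pyGetD (PySem.List.pyGetD img2 (r + dr) []) (c + dc) 0 == 1 then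
                cur + 1
              else cur
            else cur
          else cur) cur) (0 : Int) = 0 := by
    intro dr dc
    rw [PySem.List.foldl_congr_mem' _ _ (fun cur _ => cur) 0 ?_]
    · exact PySem.List.foldl_ignore _ _
    · intro r hr' cur
      rw [PySem.List.foldl_congr_mem' _ _ (fun cur _ => cur) cur ?_]
      · exact PySem.List.foldl_ignore _ _
      · intro c hc cur'
        rw [PySem.List.mem_pyRange_one] at hr' hc
        rw [hN] at hr' hc
        have hrow : PySem.List.pyGetD img1 r [] ∈ img1 := by
          rw [PySem.List.pyGetD_eq_getElem img1 [] hr'.1 (by omega)]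
          exact List.getElem_mem _
        obtain ⟨hlen, hcl⟩ := hr _ hrow
        have hvmem : PySem.List.pyGetD (PySem.List.pyGetD img1 r []) c 0 ∈
            PySem.List.pyGetD img1 r [] := by
          rw [PySem.List.pyGetD_eq_getElem _ 0 hc.1 (by omega)]
          exact List.getElem_mem _
        have : ¬(PySem.List.pyGetD (PySem.List.pyGetD img1 r []) c 0 == 1) := by
          intro hbeq
          exact hcl (eq_of_beq hbeq ▸ hvmem)
        simp [this]
  refine Eq.trans (b := (PySem.List.pyRange (-(PySem.List.len img1 - 1)) (PySem.List.len img1) 1).foldl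
      (fun a dr => (PySem.List.pyRange (-(PySem.List.len img1 - 1)) (PySem.List.len img1) 1).foldl
        (fun a dc => max a 0) a) 0) ?_ ?_
  · apply PySem.List.foldl_congr_mem'
    intro dr _ a
    apply PySem.List.foldl_congr_mem'
    intro dc _ b
    rw [hinner dr dc]
  · refine Eq.trans (nested_max _ _ (fun _ _ => 0) 0) ?_
    apply le_antisymm
    · exact foldl_max_le_proj _ _ 0 0 le_rfl (fun x _ => le_rfl)
    · exact (PySem.List.le_foldl_max_int _ _ 0).1

-- ===== VERDICT (by name: the statement is the Claim_ definition above) =====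
theorem largestOverlap_spec : Claim_equal_largestOverlap := by
  intro img1 img2 _hdom hpre
  obtain ⟨hr1, hcase⟩ := hpre
  unfold Spec_largestOverlap
  rcases hcase with hclean | ⟨h2, hr2, hx2⟩
  · rw [aZero img1 img2 img1.length rfl
      (fun row hrow => ⟨(hr1 row hrow).1, hclean row hrow⟩)]
    rw [altZero img1 img2 (pvOnes_nil img1 hclean)]
  · exact main_eq img1 img2 img1.length rfl hr1 ⟨h2, hr2, hx2⟩
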